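-- pv_equiv track=rewrite | github.com/liuyingxuvka/FlowGuard | flowguard/explorer.py | enumerate_input_sequences
-- ===== SOURCE A (Python) =====
-- from itertools import product
-- from typing import Any, Callable, Iterable, Sequence
--
-- def enumerate_input_sequences(
--     external_inputs: Sequence[Any],
--     max_sequence_length: int,
-- ) -> tuple[tuple[Any, ...], ...]:
--     """Enumerate all non-empty input sequences up to a finite length."""
--
--     if max_sequence_length < 1:
--         raise ValueError("max_sequence_length must be at least 1")
--     inputs = tuple(external_inputs)
--     return tuple(
--         sequence
--         for length in range(1, max_sequence_length + 1)
--         for sequence in product(inputs, repeat=length)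
--     )
-- ===== SOURCE B (Python) =====
-- def enumerate_input_sequences(external_inputs, max_sequence_length):
--     if max_sequence_length < 1:
--         raise ValueError("max_sequence_length must be at least 1")
--     inputs = tuple(external_inputs)
--     current = [(x,) for x in inputs]
--     result = list(current)
--     for _ in range(2, max_sequence_length + 1):
--         current = [seq + (x,) for seq in current for x in inputs]
--         result.extend(current)
--     return tuple(result)
-- ===== Notes on version B (the rewrite author's own statement) =====
-- stated objective: alternative
-- what changed: Replaces the per-length itertools.product enumeration by an incremental frontier: length-k sequences are built once by extending the stored length-(k-1) sequences, instead of regenerating each length from scratch.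
import Mathlib
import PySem

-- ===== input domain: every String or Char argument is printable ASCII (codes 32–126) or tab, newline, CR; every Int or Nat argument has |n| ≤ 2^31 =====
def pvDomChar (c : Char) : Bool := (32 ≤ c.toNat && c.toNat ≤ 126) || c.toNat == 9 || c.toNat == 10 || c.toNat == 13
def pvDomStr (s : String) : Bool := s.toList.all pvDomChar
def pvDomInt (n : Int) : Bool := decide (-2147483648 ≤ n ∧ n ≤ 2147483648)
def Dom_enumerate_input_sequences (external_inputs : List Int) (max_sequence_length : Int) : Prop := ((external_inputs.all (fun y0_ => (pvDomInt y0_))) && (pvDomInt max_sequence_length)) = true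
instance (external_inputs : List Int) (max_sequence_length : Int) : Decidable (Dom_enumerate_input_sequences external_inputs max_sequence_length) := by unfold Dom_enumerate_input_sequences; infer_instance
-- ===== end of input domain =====

-- B replaces the per-length itertools.product enumeration by an incremental frontier that
-- extends the previously built length-(k-1) sequences (alternative decomposition, same results).


-- ===== PORT A =====
-- itertools.product(inputs, repeat=n): first coordinate varies slowest, exactly this recursion
def pvProdRep (inputs : List Int) : Nat → List (List Int)
  | 0 => [[]]
  | n + 1 => inputs.flatMap (fun x => (pvProdRep inputs n).map (fun s => x :: s))

def enumerate_input_sequences (external_inputs : List Int) (max_sequence_length : Int) : List (List Int) :=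
  if max_sequence_length < 1 then []  -- Python raises ValueError here; excluded by Pre_
  else
    (PySem.List.pyRange 1 (max_sequence_length + 1) 1).foldl
      (fun acc len => acc ++ pvProdRep external_inputs len.toNat) []

-- ===== PORT B =====
def pvStep (inputs : List Int) (current : List (List Int)) : List (List Int) :=
  current.flatMap (fun seq => inputs.map (fun x => seq ++ [x]))

def enumerate_input_sequences_alt (external_inputs : List Int) (max_sequence_length : Int) : List (List Int) :=
  if max_sequence_length < 1 then []  -- Python raises ValueError here; excluded by Pre_
  else
    let current := external_inputs.map (fun x => [x])
    let st := (PySem.List.pyRange 2 (max_sequence_length + 1) 1).foldl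
      (fun (st : List (List Int) × List (List Int)) _ =>
        let nxt := pvStep external_inputs st.2
        (st.1 ++ nxt, nxt)) (current, current)
    st.1

-- ===== PRECONDITION & SPEC =====
-- A raises ValueError exactly when max_sequence_length < 1
def Pre_enumerate_input_sequences (external_inputs : List Int) (max_sequence_length : Int) : Prop :=
  1 ≤ max_sequence_length
instance (external_inputs : List Int) (max_sequence_length : Int) : Decidable (Pre_enumerate_input_sequences external_inputs max_sequence_length) := by unfold Pre_enumerate_input_sequences; infer_instance

def pvWitness_enumerate_input_sequences : List Int × Int := ([1, 2], 3)

def Spec_enumerate_input_sequences (external_inputs : List Int) (max_sequence_length : Int) (out : List (List Int)) : Prop := out = enumerate_input_sequences_alt external_inputs max_sequence_length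
instance (external_inputs : List Int) (max_sequence_length : Int) (out : List (List Int)) : Decidable (Spec_enumerate_input_sequences external_inputs max_sequence_length out) := by unfold Spec_enumerate_input_sequences; infer_instance

-- ===== CLAIM (what is proved, stated in full; the proofs are below) =====
def Claim_equal_enumerate_input_sequences : Prop := ∀ (external_inputs : List Int) (max_sequence_length : Int), Dom_enumerate_input_sequences external_inputs max_sequence_length → Pre_enumerate_input_sequences external_inputs max_sequence_length → Spec_enumerate_input_sequences external_inputs max_sequence_length (enumerate_input_sequences external_inputs max_sequence_length)

-- ===== LEMMAS AND PROOFS =====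

-- extending every length-n product by one rightmost coordinate gives the length-(n+1) product
theorem pvStep_prodRep (inputs : List Int) (n : Nat) :
    pvStep inputs (pvProdRep inputs n) = pvProdRep inputs (n + 1) := by
  induction n with
  | zero =>
    induction inputs with
    | nil => rfl
    | cons y ys ihy => simp_all [pvStep, pvProdRep]
  | succ n ih =>
    rw [pvProdRep, pvProdRep, ← ih]
    simp only [pvStep, List.flatMap_map, List.map_flatMap, List.flatMap_assoc, Function.comp_def,
      List.map_map, List.cons_append]

-- invariant of B's loop over [2, m+1): starting from (concat of products 1..k, product k)
theorem pvAlt_loop (inputs : List Int) (m k : Nat) (acc : List (List Int))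
    (h : 1 ≤ k) (hk : k ≤ m) :
    (PySem.List.pyRange (k + 1) (m + 1) 1).foldl
      (fun (st : List (List Int) × List (List Int)) _ =>
        let nxt := pvStep inputs st.2
        (st.1 ++ nxt, nxt)) (acc, pvProdRep inputs k) =
    ((PySem.List.pyRange (k + 1) (m + 1) 1).foldl
      (fun a len => a ++ pvProdRep inputs len.toNat) acc,
     pvProdRep inputs m) := by
  induction m with
  | zero => omega
  | succ m ih =>
    by_cases hkm : k = m + 1
    · subst hkm
      rw [PySem.List.pyRange_one_eq_nil (by push_cast; omega)]
      simp
    · have hk' : k ≤ m := by omega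
      have hsplit : PySem.List.pyRange ((k : Nat) + 1) (((m + 1 : Nat) : Int) + 1) 1 =
          PySem.List.pyRange ((k : Nat) + 1) ((m : Int) + 1) 1 ++ [(m : Int) + 1] := by
        rw [show ((m + 1 : Nat) : Int) + 1 = ((m : Int) + 1) + 1 by push_cast; ring]
        exact PySem.List.pyRange_one_succ_right (by omega)
      rw [hsplit, List.foldl_append, List.foldl_append]
      rw [ih hk']
      simp only [List.foldl_cons, List.foldl_nil]
      rw [pvStep_prodRep]
      have htn : ((m : Int) + 1).toNat = m + 1 := by
        rw [show ((m : Int) + 1) = ((m + 1 : Nat) : Int) by push_cast; ring, Int.toNat_natCast]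
      rw [htn]

theorem pvProdRep_one (inputs : List Int) :
    pvProdRep inputs 1 = inputs.map (fun x => [x]) := by
  induction inputs with
  | nil => rfl
  | cons y ys ih => simp_all [pvProdRep]

-- ===== VERDICT (by name: the statement is the Claim_ definition above) =====
theorem enumerate_input_sequences_spec : Claim_equal_enumerate_input_sequences := by
  intro inputs m _ hpre
  unfold Spec_enumerate_input_sequences enumerate_input_sequences enumerate_input_sequences_alt
  have hm : ¬ m < 1 := by exact not_lt.mpr hpre
  rw [if_neg hm, if_neg hm]
  obtain ⟨n, rfl⟩ : ∃ n : Nat, m = (n : Int) := ⟨m.toNat, by omega⟩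
  have hn : 1 ≤ n := by simp [Pre_enumerate_input_sequences] at hpre; omega
  have h1 : PySem.List.pyRange 1 ((n : Int) + 1) 1 =
      1 :: PySem.List.pyRange 2 ((n : Int) + 1) 1 := by
    have := PySem.List.pyRange_one_cons (a := 1) (b := (n : Int) + 1) (by omega)
    simpa using this
  rw [h1]
  simp only [List.foldl_cons, List.nil_append]
  have hp1 : pvProdRep inputs (1 : Int).toNat = pvProdRep inputs 1 := rfl
  have key := pvAlt_loop inputs n 1 (pvProdRep inputs 1) (le_refl 1) hn
  have h2 : ((1 : Nat) : Int) + 1 = 2 := by norm_num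
  rw [h2] at key
  rw [hp1, ← pvProdRep_one inputs]
  rw [key]
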